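-- pv_equiv track=rewrite | github.com/thaheer-uzamaki/Code | Simple adding.py | simple_adding
-- ===== SOURCE A (Python) =====
-- def simple_adding(num):
--     total=0
--     for num in range(num+1):
--         total+=num
--     res1=str(total)
--     token='abcd'
--     token1=token[::-1]
--     res=res1[::-1]
--     return f'{res}:{token1}'
-- ===== SOURCE B (Python) =====
-- def simple_adding(num):
--     t = num * (num + 1) // 2 if num > 0 else 0
--     return str(t)[::-1] + ':dcba'
-- ===== Notes on version B (the rewrite author's own statement) =====
-- stated objective: faster
-- what changed: Replaced A's linear summation loop over the range by the closed-form Gauss formula (guarded for non-positive input, where the range is empty), and folded the constant token reversal into a string literal.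
import Mathlib
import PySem

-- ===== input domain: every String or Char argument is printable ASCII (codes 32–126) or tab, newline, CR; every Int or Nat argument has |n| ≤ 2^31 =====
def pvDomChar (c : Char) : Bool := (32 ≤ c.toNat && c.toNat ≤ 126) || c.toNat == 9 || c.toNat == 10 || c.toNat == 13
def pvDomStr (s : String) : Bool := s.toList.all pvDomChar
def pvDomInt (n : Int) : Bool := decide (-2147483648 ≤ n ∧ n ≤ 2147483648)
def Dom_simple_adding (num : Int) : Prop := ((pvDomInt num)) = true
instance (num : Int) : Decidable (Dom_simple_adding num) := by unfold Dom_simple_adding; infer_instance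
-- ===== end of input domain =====

-- B replaces A's O(n) summation loop by the closed-form Gauss sum n(n+1)//2 (O(1)).

-- ===== PORT A =====
def simple_adding (num : Int) : String :=
  let total : Int := (PySem.List.pyRange 0 (num + 1) 1).foldl (fun t n => t + n) 0
  let res1 : String := PySem.Int.toStr total
  let token : String := "abcd"
  let token1 : String := (PySem.Str.slice? token none none (-1)).getD ""
  let res : String := (PySem.Str.slice? res1 none none (-1)).getD ""
  res ++ ":" ++ token1

-- ===== PORT B =====
def simple_adding_alt (num : Int) : String :=
  let t : Int := if 0 < num then PySem.Int.floordiv (num * (num + 1)) 2 else 0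
  ((PySem.Str.slice? (PySem.Int.toStr t) none none (-1)).getD "") ++ ":dcba"

-- ===== PRECONDITION & SPEC =====
def Spec_simple_adding (num : Int) (out : String) : Prop := out = simple_adding_alt num
instance (num : Int) (out : String) : Decidable (Spec_simple_adding num out) := by unfold Spec_simple_adding; infer_instance

-- ===== CLAIM (what is proved, stated in full; the proofs are below) =====
def Claim_equal_simple_adding : Prop := ∀ (num : Int), Dom_simple_adding num → Spec_simple_adding num (simple_adding num)

-- ===== LEMMAS AND PROOFS =====

lemma pv_sum_double (m : Int) (hm : 0 ≤ m) :
    2 * (PySem.List.pyRange 0 (m + 1) 1).foldl (fun t n => t + n) 0 = m * (m + 1) := by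
  induction m, hm using Int.le_induction with
  | base => decide
  | succ m hm ih =>
    rw [PySem.List.pyRange_one_succ_right (by omega), List.foldl_append]
    simp only [List.foldl] at *
    ring_nf
    ring_nf at ih
    omega

lemma pv_total_eq (num : Int) :
    (PySem.List.pyRange 0 (num + 1) 1).foldl (fun t n => t + n) 0 =
      (if 0 < num then PySem.Int.floordiv (num * (num + 1)) 2 else 0) := by
  by_cases h : 0 < num
  · have h2 := pv_sum_double num (by omega)
    rw [if_pos h]
    rw [eq_comm, PySem.Int.floordiv_eq_iff_of_pos (by omega)]
    omega
  · rw [if_neg h]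
    rcases lt_or_eq_of_le (not_lt.mp h) with h0 | h0
    · rw [PySem.List.pyRange_one_eq_nil (by omega)]; rfl
    · subst h0; decide

-- ===== VERDICT (by name: the statement is the Claim_ definition above) =====
theorem simple_adding_spec : Claim_equal_simple_adding := by
  intro num _
  unfold Spec_simple_adding simple_adding simple_adding_alt
  rw [pv_total_eq]
  simp only [PySem.Str.slice?_none_none_neg_one, Option.getD_some]
  rw [String.append_assoc]
  rfl
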